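-- pv_equiv track=rewrite | github.com/jacbus1/Polymarket-News-Trader | src/polymarket_news_trader/strategy.py | _contains_none
-- ===== SOURCE A (Python) =====
-- def _contains_none(norm_text: str, tokens: set[str], keywords: list[str]) -> bool:
--     for k in keywords:
--         if not k:
--             continue
--         if " " in k:
--             if k.lower() in norm_text:
--                 return False
--         else:
--             if k.lower() in tokens:
--                 return False
--     return True
-- ===== SOURCE B (Python) =====
-- def _contains_none(norm_text: str, tokens: set[str], keywords: list[str]) -> bool:
--     # Partition keywords once into single-token words and phrase keywords,
--     # then match words via set intersection and phrases via any().
--     words = set()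
--     phrases = []
--     for k in keywords:
--         if not k:
--             continue
--         if " " in k:
--             phrases.append(k.lower())
--         else:
--             words.add(k.lower())
--     if words & tokens:
--         return False
--     return not any(p in norm_text for p in phrases)
-- ===== Notes on version B (the rewrite author's own statement) =====
-- stated objective: idiomatic
-- what changed: Replaces the single early-return loop with a partition pass (word set vs phrase list) followed by a set-intersection test for words and an any() over phrases.
import Mathlib
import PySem

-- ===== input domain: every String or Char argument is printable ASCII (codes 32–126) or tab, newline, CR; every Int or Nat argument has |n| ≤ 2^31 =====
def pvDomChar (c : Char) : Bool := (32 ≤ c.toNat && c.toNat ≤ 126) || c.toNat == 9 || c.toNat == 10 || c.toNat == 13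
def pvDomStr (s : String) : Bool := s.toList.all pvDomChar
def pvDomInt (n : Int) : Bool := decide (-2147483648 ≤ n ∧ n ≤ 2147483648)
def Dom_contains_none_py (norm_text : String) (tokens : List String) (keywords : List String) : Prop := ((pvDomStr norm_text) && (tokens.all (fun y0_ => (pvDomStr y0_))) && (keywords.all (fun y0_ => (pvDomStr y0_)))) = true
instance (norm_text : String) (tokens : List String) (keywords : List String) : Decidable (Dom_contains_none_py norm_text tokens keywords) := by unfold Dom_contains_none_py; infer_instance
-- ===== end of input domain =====

-- B partitions the keywords once into a word set and a phrase list, then tests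
-- words by set intersection with tokens and phrases by any() over the text (idiomatic decomposition; same cost).

-- ===== PORT A =====
-- A's single loop with early return False
def cnLoopA (norm_text : String) (tokens : List String) : List String → Bool
  | [] => true
  | k :: rest =>
    if k == "" then cnLoopA norm_text tokens rest
    else if PySem.Str.isIn " " k then
      if PySem.Str.isIn (PySem.Str.lower k) norm_text then false
      else cnLoopA norm_text tokens rest
    else
      if tokens.contains (PySem.Str.lower k) then false
      else cnLoopA norm_text tokens rest

def contains_none_py (norm_text : String) (tokens : List String) (keywords : List String) : Bool :=
  cnLoopA norm_text tokens keywords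

-- ===== PORT B =====
-- B's partition step: accumulate (word set, phrase list)
def cnStep (wp : PySem.Set String × List String) (k : String) : PySem.Set String × List String :=
  if k == "" then wp
  else if PySem.Str.isIn " " k then (wp.1, wp.2 ++ [PySem.Str.lower k])
  else (PySem.Set.add wp.1 (PySem.Str.lower k), wp.2)

def contains_none_py_alt (norm_text : String) (tokens : List String) (keywords : List String) : Bool :=
  let wp := keywords.foldl cnStep (PySem.Set.empty, ([] : List String))
  if PySem.Set.inter wp.1 tokens = [] then
    !(wp.2.any (fun p => PySem.Str.isIn p norm_text))
  else false

-- ===== PRECONDITION & SPEC =====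
def Spec_contains_none_py (norm_text : String) (tokens : List String) (keywords : List String) (out : Bool) : Prop := out = contains_none_py_alt norm_text tokens keywords
instance (norm_text : String) (tokens : List String) (keywords : List String) (out : Bool) : Decidable (Spec_contains_none_py norm_text tokens keywords out) := by unfold Spec_contains_none_py; infer_instance

-- ===== CLAIM (what is proved, stated in full; the proofs are below) =====
def Claim_equal_contains_none_py : Prop := ∀ (norm_text : String) (tokens : List String) (keywords : List String), Dom_contains_none_py norm_text tokens keywords → Spec_contains_none_py norm_text tokens keywords (contains_none_py norm_text tokens keywords)

-- ===== LEMMAS AND PROOFS =====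

-- whether keyword k matches (k nonempty and its lowered form hits the text or token set)
def cnMatch (norm_text : String) (tokens : List String) (k : String) : Bool :=
  !(k == "") && (if PySem.Str.isIn " " k then PySem.Str.isIn (PySem.Str.lower k) norm_text
                 else tokens.contains (PySem.Str.lower k))

theorem cnLoopA_eq_all (norm_text : String) (tokens : List String) (ks : List String) :
    cnLoopA norm_text tokens ks = ks.all (fun k => !cnMatch norm_text tokens k) := by
  induction ks with
  | nil => rfl
  | cons k rest ih =>
    simp only [cnLoopA, List.all_cons, cnMatch]
    split_ifs <;> simp_all [cnMatch, beq_iff_eq]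

-- B's final check as a function of the accumulator
def cnCheck (norm_text : String) (tokens : List String) (wp : PySem.Set String × List String) : Bool :=
  decide (PySem.Set.inter wp.1 tokens = []) && !(wp.2.any (fun p => PySem.Str.isIn p norm_text))

theorem inter_add_eq_nil (w : PySem.Set String) (tokens : List String) (x : String) :
    (PySem.Set.inter (PySem.Set.add w x) tokens = []) ↔
      (PySem.Set.inter w tokens = [] ∧ ¬ x ∈ tokens) := by
  simp only [List.eq_nil_iff_forall_not_mem, PySem.Set.mem_inter, PySem.Set.mem_add]
  constructor
  · intro h
    refine ⟨fun y hy => h y ⟨Or.inl hy.1, hy.2⟩, fun hx => h x ⟨Or.inr rfl, hx⟩⟩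
  · rintro ⟨h, hx⟩ y ⟨hy1 | rfl, hy2⟩
    · exact h y ⟨hy1, hy2⟩
    · exact hx hy2

theorem cnCheck_foldl (norm_text : String) (tokens : List String) (ks : List String)
    (wp : PySem.Set String × List String) :
    cnCheck norm_text tokens (ks.foldl cnStep wp) =
      (cnCheck norm_text tokens wp && ks.all (fun k => !cnMatch norm_text tokens k)) := by
  induction ks generalizing wp with
  | nil => simp
  | cons k rest ih =>
    simp only [List.foldl_cons, List.all_cons, ih]
    have hstep : cnCheck norm_text tokens (cnStep wp k) =
        (cnCheck norm_text tokens wp && !cnMatch norm_text tokens k) := by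
      by_cases h1 : k = ""
      · simp [cnStep, cnMatch, cnCheck, h1]
      · by_cases h2 : PySem.Chars.isIn [' '] k.toList = true
        · have h1' : (k == "") = false := beq_eq_false_iff_ne.mpr h1
          simp [cnStep, cnMatch, cnCheck, h1', h2, Bool.and_assoc]
        · have hadd := inter_add_eq_nil wp.1 tokens (PySem.Str.lower k)
          by_cases h3 : PySem.Set.inter wp.1 tokens = [] <;>
            by_cases h4 : PySem.Str.lower k ∈ tokens <;>
              simp [cnStep, cnMatch, cnCheck, h1, h2, h3, h4, hadd, beq_iff_eq]
    rw [hstep, Bool.and_assoc]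

theorem alt_eq_check (norm_text : String) (tokens : List String) (ks : List String) :
    contains_none_py_alt norm_text tokens ks =
      cnCheck norm_text tokens (ks.foldl cnStep (PySem.Set.empty, [])) := by
  simp only [contains_none_py_alt, cnCheck]
  split_ifs with h
  · rw [decide_eq_true h, Bool.true_and]
  · rw [decide_eq_false h, Bool.false_and]

-- ===== VERDICT (by name: the statement is the Claim_ definition above) =====
theorem contains_none_py_spec : Claim_equal_contains_none_py := by
  intro norm_text tokens keywords _
  unfold Spec_contains_none_py contains_none_py
  rw [alt_eq_check, cnCheck_foldl, cnLoopA_eq_all]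
  have : cnCheck norm_text tokens (PySem.Set.empty, []) = true := by
    simp [cnCheck, PySem.Set.empty, PySem.Set.inter]
  rw [this, Bool.true_and]
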